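-- pv_equiv track=rewrite | github.com/LeonPaganini/nutrisigno | agents/cardapio_builder.py | _select_default_items
-- ===== SOURCE A (Python) =====
-- from typing import Any, Dict, Iterable, List, Mapping, MutableMapping, Tuple
--
-- def _select_default_items(items: List[str], portions: int) -> Tuple[List[str], Dict[str, int]]:
--     """Seleciona itens padrão (determinísticos) e suas contagens."""
--
--     if not items:
--         return [], {}
--
--     chosen: List[str] = []
--     counts: Dict[str, int] = {}
--     for idx in range(portions):
--         item = items[idx % len(items)]
--         chosen.append(item)
--         counts[item] = counts.get(item, 0) + 1
--
--     return chosen, counts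
-- ===== SOURCE B (Python) =====
-- from typing import Dict, List, Tuple
--
-- def _select_default_items(items: List[str], portions: int) -> Tuple[List[str], Dict[str, int]]:
--     """Seleciona itens padrão (determinísticos) e suas contagens."""
--     n = len(items)
--     if n == 0 or portions <= 0:
--         return [], {}
--     q, r = divmod(portions, n)
--     head, tail = items[:r], items[r:]
--     chosen = items * q + head
--     counts: Dict[str, int] = {}
--     for item in head:
--         counts[item] = counts.get(item, 0) + q + 1
--     if q:
--         for item in tail:
--             counts[item] = counts.get(item, 0) + q
--     return chosen, counts
-- ===== Notes on version B (the rewrite author's own statement) =====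
-- stated objective: alternative
-- what changed: Replaces the per-portion loop (one list append and one dict update per range(portions) index) by a closed form: divmod(portions, n) gives q full rounds and remainder r, the chosen list is built as items*q + items[:r], and the counts dict is filled in one pass over items (weight q+1 for the first r items, q for the rest, the second pass skipped when q==0).
import Mathlib
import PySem

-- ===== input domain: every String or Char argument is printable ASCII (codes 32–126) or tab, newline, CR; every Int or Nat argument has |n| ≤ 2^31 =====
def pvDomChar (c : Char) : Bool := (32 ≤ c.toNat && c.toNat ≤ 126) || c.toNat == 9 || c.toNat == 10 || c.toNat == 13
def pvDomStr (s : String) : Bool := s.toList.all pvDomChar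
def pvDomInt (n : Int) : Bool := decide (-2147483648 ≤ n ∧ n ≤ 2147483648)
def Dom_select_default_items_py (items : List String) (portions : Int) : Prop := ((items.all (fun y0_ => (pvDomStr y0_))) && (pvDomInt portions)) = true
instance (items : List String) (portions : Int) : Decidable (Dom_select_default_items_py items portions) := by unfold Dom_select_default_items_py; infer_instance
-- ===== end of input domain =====

-- B builds the round-robin list and the counts dict in closed form from divmod(portions, n)
-- instead of A's one-append-one-dict-update-per-portion loop (objective: alternative algorithm).

-- ===== PORT A =====
def select_default_items_py (items : List String) (portions : Int) : List String × (List (String × Int)) :=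
  if items = [] then ([], [])
  else
    -- for idx in range(portions): item = items[idx % len(items)]; chosen.append(item); counts[item] = counts.get(item, 0) + 1
    -- (idx ≥ 0 and len(items) > 0 here, so the index is always in range: pyGetD's default is never used)
    let st := (PySem.List.pyRange 0 portions 1).foldl
      (fun (st : List String × PySem.Dict String Int) idx =>
        let item := PySem.List.pyGetD items (PySem.Int.mod idx (PySem.List.len items)) ""
        (st.1 ++ [item], st.2.insert item (st.2.getD item 0 + 1)))
      ([], PySem.Dict.empty)
    (st.1, st.2.items)

-- ===== PORT B =====
def select_default_items_py_alt (items : List String) (portions : Int) : List String × (List (String × Int)) :=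
  let n : Int := PySem.List.len items
  if n = 0 ∨ portions ≤ 0 then ([], [])
  else
    let q := PySem.Int.floordiv portions n
    let r := PySem.Int.mod portions n
    let head := PySem.List.slice items none (some r)
    let tail := PySem.List.slice items (some r) none
    -- items * q + head  (q ≥ 0 here, so Python list repetition is q.toNat copies)
    let chosen := (List.replicate q.toNat items).flatten ++ head
    let d1 := head.foldl (fun d it => d.insert it (d.getD it 0 + q + 1)) PySem.Dict.empty
    let counts := if q ≠ 0 then tail.foldl (fun d it => d.insert it (d.getD it 0 + q)) d1 else d1
    (chosen, counts.items)

-- ===== PRECONDITION & SPEC =====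
def Spec_select_default_items_py (items : List String) (portions : Int) (out : List String × (List (String × Int))) : Prop := out = select_default_items_py_alt items portions
instance (items : List String) (portions : Int) (out : List String × (List (String × Int))) : Decidable (Spec_select_default_items_py items portions out) := by unfold Spec_select_default_items_py; infer_instance

-- ===== CLAIM (what is proved, stated in full; the proofs are below) =====
def Claim_equal_select_default_items_py : Prop := ∀ (items : List String) (portions : Int), Dom_select_default_items_py items portions → Spec_select_default_items_py items portions (select_default_items_py items portions)

-- ===== LEMMAS AND PROOFS =====

def pvWSum (k : String) (ps : List (String × Int)) : Int :=
  ((ps.filter (fun p => p.1 == k)).map (·.2)).sum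

theorem pvWSum_map_const (k : String) (l : List String) (c : Int) :
    pvWSum k (l.map (fun x => (x, c))) = c * (l.count k : Int) := by
  induction l with
  | nil => simp [pvWSum]
  | cons x l ih =>
    simp only [pvWSum, List.map_cons, List.filter_cons] at *
    by_cases h : x = k
    · subst h
      simp only [beq_self_eq_true, if_true, List.map_cons, List.sum_cons, List.count_cons_self]
      rw [ih]; push_cast; ring
    · have : ((x, c).1 == k) = false := by simpa using h
      simp only [this, if_false, List.count_cons]
      simp [h]
      exact ih

theorem pvCount_flatten_replicate (q : Nat) (xs : List String) (k : String) :
    ((List.replicate q xs).flatten).count k = q * xs.count k := by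
  induction q with
  | zero => simp
  | succ q ih => rw [List.replicate_succ]; simp [List.count_append, ih]; ring

theorem pvOfList_append_of_subset (xs ys : List String) (h : ∀ y ∈ ys, y ∈ xs) :
    PySem.Set.ofList (xs ++ ys) = PySem.Set.ofList xs := by
  induction ys using List.reverseRecOn with
  | nil => simp
  | append_singleton ys y ih =>
    rw [← List.append_assoc, PySem.Set.ofList_append_singleton,
        ih (fun z hz => h z (List.mem_append_left _ hz))]
    have hy : y ∈ PySem.Set.ofList xs := (PySem.Set.mem_ofList _ _).mpr (h y (by simp))
    have hc : PySem.Set.contains (PySem.Set.ofList xs) y = true := (PySem.Set.contains_iff _ _).mpr hy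
    simp [PySem.Set.add, hc]
    exact h y (by simp)


theorem pvWSum_append (k : String) (ps qs : List (String × Int)) :
    pvWSum k (ps ++ qs) = pvWSum k ps + pvWSum k qs := by
  simp [pvWSum, List.filter_append]

theorem pvWSum_singleton (k : String) (p : String × Int) :
    pvWSum k [p] = if p.1 = k then p.2 else 0 := by
  by_cases h : p.1 = k <;> simp [pvWSum, h]

theorem pvWSum_eq_zero_of_not_mem (k : String) (ps : List (String × Int))
    (h : k ∉ ps.map Prod.fst) : pvWSum k ps = 0 := by
  have : ps.filter (fun p => p.1 == k) = [] := by
    rw [List.filter_eq_nil_iff]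
    intro p hp hbeq
    exact h (List.mem_map.mpr ⟨p, hp, by simpa using hbeq⟩)
  simp [pvWSum, this]

theorem pvWFold_items (ps : List (String × Int)) :
    (ps.foldl (fun d p => d.insert p.1 (d.getD p.1 0 + p.2)) PySem.Dict.empty).items
      = (PySem.Set.ofList (ps.map Prod.fst)).map (fun k => (k, pvWSum k ps)) := by
  induction ps using List.reverseRecOn with
  | nil => simp [PySem.Dict.empty]
  | append_singleton ps p ih =>
    rw [List.foldl_append, List.foldl_cons, List.foldl_nil]
    set D := ps.foldl (fun d p => d.insert p.1 (d.getD p.1 0 + p.2)) PySem.Dict.empty with hD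
    have hkeys : D.keys = PySem.Set.ofList (ps.map Prod.fst) := by
      simp [PySem.Dict.keys, ih, List.map_map, Function.comp_def]
    have hnodup : D.keys.Nodup := by rw [hkeys]; exact PySem.Set.nodup_ofList _
    have hSnodup := PySem.Set.nodup_ofList (ps.map Prod.fst)
    have hfst : List.map Prod.fst [p] = [p.1] := rfl
    rw [List.map_append, hfst, PySem.Set.ofList_append_singleton]
    by_cases hmem : p.1 ∈ ps.map Prod.fst
    · have hmemS : p.1 ∈ PySem.Set.ofList (ps.map Prod.fst) := (PySem.Set.mem_ofList _ _).mpr hmem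
      have hcont : D.contains p.1 = true := by
        rw [PySem.Dict.contains_iff_mem_keys, hkeys]; exact hmemS
      have hget : D.getD p.1 0 = pvWSum p.1 ps := by
        apply PySem.Dict.getD_of_mem_items _ _ hnodup
        rw [ih]; exact List.mem_map.mpr ⟨p.1, hmemS, rfl⟩
      have hadd : PySem.Set.add (PySem.Set.ofList (ps.map Prod.fst)) p.1
          = PySem.Set.ofList (ps.map Prod.fst) := by
        simp [PySem.Set.add, hmemS]
      rw [PySem.Dict.items_insert_of_contains _ _ hcont, ih, hget, hadd, List.map_map]
      apply List.map_congr_left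
      intro k hk
      by_cases hkp : k = p.1
      · subst hkp
        simp [pvWSum_append, pvWSum_singleton]
      · have : (((k, pvWSum k ps)).1 == p.1) = false := by simpa using hkp
        simp [Function.comp, this, pvWSum_append, pvWSum_singleton, Ne.symm hkp]
    · have hmemS : p.1 ∉ PySem.Set.ofList (ps.map Prod.fst) := fun hc =>
        hmem ((PySem.Set.mem_ofList _ _).mp hc)
      have hcont : D.contains p.1 = false := by
        rw [Bool.eq_false_iff]
        intro hc
        exact hmemS (by rw [PySem.Dict.contains_iff_mem_keys, hkeys] at hc; exact hc)
      have hget : D.getD p.1 0 = 0 := PySem.Dict.getD_of_not_contains _ _ hcont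
      have hadd : PySem.Set.add (PySem.Set.ofList (ps.map Prod.fst)) p.1
          = PySem.Set.ofList (ps.map Prod.fst) ++ [p.1] := by
        simp [PySem.Set.add, hmemS]
      rw [PySem.Dict.items_insert_of_not_contains _ _ hcont, ih, hget, hadd, List.map_append]
      congr 1
      · apply List.map_congr_left
        intro k hk
        have hkp : k ≠ p.1 := fun h => hmemS (h ▸ hk)
        simp [pvWSum_append, pvWSum_singleton, Ne.symm hkp]
      · simp [pvWSum_append, pvWSum_singleton, pvWSum_eq_zero_of_not_mem p.1 ps hmem]

theorem pvRoundRobin (xs : List String) (d : String) (h : xs ≠ []) (p : Nat) :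
    (List.range p).map (fun i => xs.getD (i % xs.length) d)
      = (List.replicate (p / xs.length) xs).flatten ++ xs.take (p % xs.length) := by
  have hl : 0 < xs.length := List.length_pos_iff.mpr h
  induction p with
  | zero => simp
  | succ p ih =>
    rw [List.range_succ, List.map_append, ih]
    simp only [List.map_cons, List.map_nil]
    have hrr : p % xs.length < xs.length := Nat.mod_lt _ hl
    have hgetD : xs.getD (p % xs.length) d = xs[p % xs.length]'hrr := List.getD_eq_getElem _ _ hrr
    by_cases hm : p % xs.length = xs.length - 1
    · have hstep : p + 1 = xs.length * (p / xs.length + 1) := by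
        have hdm := Nat.div_add_mod p xs.length
        rw [Nat.mul_succ]; omega
      have hq : (p + 1) / xs.length = p / xs.length + 1 := by
        rw [hstep, Nat.mul_div_cancel_left _ hl]
      have hr : (p + 1) % xs.length = 0 := by
        rw [hstep, Nat.mul_mod_right]
      have htake : xs.take (p % xs.length) ++ [xs[p % xs.length]'hrr] = xs := by
        have h1 : xs.take (p % xs.length + 1) = xs.take (p % xs.length) ++ [xs[p % xs.length]'hrr] := by
          rw [List.take_succ]; simp [List.getElem?_eq_getElem hrr]
        rw [← h1, show p % xs.length + 1 = xs.length by omega, List.take_length]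
      rw [hq, hr, hgetD, List.replicate_succ', List.flatten_append, List.append_assoc, htake]
      simp
    · have hq : (p + 1) / xs.length = p / xs.length := by
        rcases Nat.div_add_mod p xs.length with hdm
        rw [show p + 1 = (p % xs.length + 1) + xs.length * (p / xs.length) by omega,
            Nat.add_mul_div_left _ _ hl, Nat.div_eq_of_lt (by omega)]
        omega
      have hr : (p + 1) % xs.length = p % xs.length + 1 := by
        rcases Nat.div_add_mod p xs.length with hdm
        rw [show p + 1 = (p % xs.length + 1) + xs.length * (p / xs.length) by omega,
            Nat.add_mul_mod_self_left, Nat.mod_eq_of_lt (by omega)]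
      rw [hq, hr, hgetD, List.append_assoc]
      congr 1
      rw [List.take_succ]
      congr 1
      simp [List.getElem?_eq_getElem hrr]

theorem pvPairFold (S : List String) (cs : List String) (d : PySem.Dict String Int) :
    S.foldl (fun st x => (st.1 ++ [x], st.2.insert x (st.2.getD x 0 + 1))) (cs, d)
      = (cs ++ S, S.foldl (fun d x => d.insert x (d.getD x 0 + 1)) d) := by
  induction S generalizing cs d with
  | nil => simp
  | cons x S ih => simp [ih]

theorem pvMain (items : List String) (portions : Int) :
    select_default_items_py items portions = select_default_items_py_alt items portions := by
  unfold select_default_items_py select_default_items_py_alt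
  by_cases hnil : items = []
  · subst hnil; simp [PySem.List.len]
  · rw [if_neg hnil]
    have hl : 0 < items.length := List.length_pos_iff.mpr hnil
    by_cases hp : portions ≤ 0
    · rw [PySem.List.pyRange_one_eq_nil hp]
      rw [if_pos (Or.inr hp)]
      simp [PySem.Dict.empty]
    · push_neg at hp
      have hguard : ¬((PySem.List.len items : Int) = 0 ∨ portions ≤ 0) := by
        simp [PySem.List.len_eq]
        constructor
        · omega
        · omega
      rw [if_neg hguard]
      obtain ⟨pN, rfl⟩ : ∃ pN : Nat, portions = (pN : Int) := ⟨portions.toNat, (Int.toNat_of_nonneg hp.le).symm⟩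
      set nl := items.length with hnl
      have hlen : PySem.List.len items = (nl : Int) := PySem.List.len_eq items
      have hq : PySem.Int.floordiv (pN : Int) (PySem.List.len items) = ((pN / nl : Nat) : Int) := by
        rw [hlen]; exact PySem.Int.floordiv_natCast pN nl
      have hr : PySem.Int.mod (pN : Int) (PySem.List.len items) = ((pN % nl : Nat) : Int) := by
        rw [hlen]; exact PySem.Int.mod_natCast pN nl
      have hA : (PySem.List.pyRange 0 (pN : Int) 1).foldl
          (fun (st : List String × PySem.Dict String Int) idx =>
            let item := PySem.List.pyGetD items (PySem.Int.mod idx (PySem.List.len items)) ""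
            (st.1 ++ [item], st.2.insert item (st.2.getD item 0 + 1)))
          ([], PySem.Dict.empty)
          = ((List.replicate (pN / nl) items).flatten ++ items.take (pN % nl),
             ((List.replicate (pN / nl) items).flatten ++ items.take (pN % nl)).foldl
               (fun d x => d.insert x (d.getD x 0 + 1)) PySem.Dict.empty) := by
        rw [PySem.List.pyRange_one]
        simp only [Int.sub_zero, Int.toNat_natCast, List.foldl_map, zero_add,
          PySem.List.len_eq, PySem.Int.mod_natCast, PySem.List.pyGetD_natCast]
        rw [← List.foldl_map (f := fun k => items.getD (k % nl) "")
            (g := fun (st : List String × PySem.Dict String Int) x =>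
              (st.1 ++ [x], st.2.insert x (st.2.getD x 0 + 1)))]
        rw [pvRoundRobin items "" hnil pN]
        rw [pvPairFold, List.nil_append]
      dsimp only
      rw [hA, hq, hr, PySem.List.slice_to_natCast, PySem.List.slice_from_natCast,
          Int.toNat_natCast]
      by_cases hqz : pN / nl = 0
      · rw [hqz]
        simp
      · have hqz' : ((pN / nl : Nat) : Int) ≠ 0 := by exact_mod_cast hqz
        rw [if_pos hqz']
        refine Prod.ext rfl ?_
        dsimp only
        have hA1 : ((List.replicate (pN / nl) items).flatten ++ List.take (pN % nl) items).foldl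
              (fun d x => d.insert x (d.getD x 0 + 1)) PySem.Dict.empty
            = (((List.replicate (pN / nl) items).flatten ++ List.take (pN % nl) items).map
                  (fun x => (x, (1:Int)))).foldl
                (fun d p => d.insert p.1 (d.getD p.1 0 + p.2)) PySem.Dict.empty := by
          rw [List.foldl_map]
        have hB0 : (fun (d : PySem.Dict String Int) (it : String) =>
              d.insert it (d.getD it 0 + ((pN / nl : Nat) : Int) + 1))
            = (fun d it => d.insert it (d.getD it 0 + (((pN / nl : Nat) : Int) + 1))) := by
          funext d it; rw [add_assoc]
        have hB1 : (List.drop (pN % nl) items).foldl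
              (fun d it => d.insert it (d.getD it 0 + ((pN / nl : Nat) : Int)))
              ((List.take (pN % nl) items).foldl
                (fun d it => d.insert it (d.getD it 0 + ((pN / nl : Nat) : Int) + 1)) PySem.Dict.empty)
            = ((List.take (pN % nl) items).map (fun x => (x, ((pN / nl : Nat) : Int) + 1))
                ++ (List.drop (pN % nl) items).map (fun x => (x, ((pN / nl : Nat) : Int)))).foldl
                (fun d p => d.insert p.1 (d.getD p.1 0 + p.2)) PySem.Dict.empty := by
          rw [List.foldl_append, List.foldl_map, List.foldl_map, hB0]
        rw [hA1, hB1, pvWFold_items, pvWFold_items]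
        have hkeysA : (((List.replicate (pN / nl) items).flatten ++ List.take (pN % nl) items).map
            (fun x => (x, (1:Int)))).map Prod.fst
            = (List.replicate (pN / nl) items).flatten ++ List.take (pN % nl) items := by
          rw [List.map_map]
          have hcomp : (Prod.fst ∘ fun x : String => (x, (1:Int))) = id := rfl
          rw [hcomp, List.map_id]
        have hkeysB : (((List.take (pN % nl) items).map (fun x => (x, ((pN / nl : Nat) : Int) + 1))
              ++ (List.drop (pN % nl) items).map (fun x => (x, ((pN / nl : Nat) : Int)))).map Prod.fst)
            = items := by
          rw [List.map_append, List.map_map, List.map_map]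
          have hc1 : (Prod.fst ∘ fun x : String => (x, ((pN / nl : Nat) : Int) + 1)) = id := rfl
          have hc2 : (Prod.fst ∘ fun x : String => (x, ((pN / nl : Nat) : Int))) = id := rfl
          rw [hc1, hc2, List.map_id, List.map_id, List.take_append_drop]
        rw [hkeysA, hkeysB]
        have hSof : PySem.Set.ofList ((List.replicate (pN / nl) items).flatten ++ List.take (pN % nl) items)
            = PySem.Set.ofList items := by
          obtain ⟨qm, hqm⟩ : ∃ qm, pN / nl = qm + 1 := ⟨pN / nl - 1, (Nat.succ_pred_eq_of_pos (Nat.pos_of_ne_zero hqz)).symm⟩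
          rw [hqm, List.replicate_succ, List.flatten_cons, List.append_assoc]
          refine pvOfList_append_of_subset _ _ ?_
          intro y hy
          rcases List.mem_append.mp hy with h1 | h2
          · rcases List.mem_flatten.mp h1 with ⟨l, hl, hyl⟩
            rw [List.eq_of_mem_replicate hl] at hyl; exact hyl
          · exact List.mem_of_mem_take h2
        rw [hSof]
        apply List.map_congr_left
        intro k hk
        have hc1 : (((List.replicate (pN / nl) items).flatten ++ List.take (pN % nl) items).count k)
            = (pN / nl) * items.count k + (List.take (pN % nl) items).count k := by
          rw [List.count_append, pvCount_flatten_replicate]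
        have hc2 : items.count k = (List.take (pN % nl) items).count k + (List.drop (pN % nl) items).count k := by
          conv_lhs => rw [← List.take_append_drop (pN % nl) items]
          rw [List.count_append]
        rw [pvWSum_map_const, pvWSum_append, pvWSum_map_const, pvWSum_map_const, hc1, hc2]
        push_cast
        ring_nf

-- ===== VERDICT (by name: the statement is the Claim_ definition above) =====
theorem select_default_items_py_spec : Claim_equal_select_default_items_py := by
  intro items portions _
  exact pvMain items portions
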